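-- pv_equiv track=rewrite | github.com/bghira/SimpleTuner | simpletuner/helpers/training/trainer.py | _summarize_accelerate_failure
-- ===== SOURCE A (Python) =====
-- from typing import Any, Callable, Dict, List, Optional, Sequence
--
-- def _summarize_accelerate_failure(exit_code: int, lines: Sequence[str]) -> tuple[str, Optional[str]]:
--     """Derive a concise failure summary and optional log excerpt from accelerate output."""
--
--     cleaned: List[str] = [line.rstrip("\n") for line in lines]
--     non_empty = [line.strip() for line in cleaned if line and line.strip()]
--
--     best_index: Optional[int] = None
--     best_line: Optional[str] = None
--
--     for idx in range(len(cleaned) - 1, -1, -1):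
--         candidate_raw = cleaned[idx].strip()
--         if not candidate_raw:
--             continue
--         lowered = candidate_raw.lower()
--         if "cuda out of memory" in lowered:
--             best_index = idx
--             best_line = candidate_raw
--             break
--         if "runtimeerror" in lowered and "cuda" in lowered:
--             if best_line is None:
--                 best_index = idx
--                 best_line = candidate_raw
--         if "childfailederror" in lowered:
--             if best_line is None:
--                 best_index = idx
--                 best_line = candidate_raw
--         if "error" in lowered and ("[error]" in lowered or lowered.startswith("error")):
--             if best_line is None:
--                 best_index = idx
--                 best_line = candidate_raw
--
--     if best_line is None:
--         for idx in range(len(cleaned) - 1, -1, -1):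
--             candidate = cleaned[idx].strip()
--             if candidate:
--                 best_index = idx
--                 best_line = candidate
--                 break
--
--     summary = f"Accelerate launch exited with status {exit_code}"
--     if best_line:
--         summary = f"{summary}: {best_line.strip()}"
--     summary = summary[:512]
--
--     excerpt: Optional[str] = None
--     if best_index is not None:
--         start = max(0, best_index - 5)
--         end = min(len(cleaned), best_index + 6)
--         snippet_lines = [line.strip() for line in cleaned[start:end] if line.strip()]
--         if snippet_lines:
--             excerpt = "\n".join(snippet_lines)
--     elif non_empty:
--         excerpt = "\n".join(non_empty[-10:])
--
--     if excerpt and len(excerpt) > 4000: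
--         excerpt = excerpt[-4000:]
--
--     return summary, excerpt
-- ===== SOURCE B (Python) =====
-- from typing import List, Optional, Sequence
--
--
-- def _summarize_accelerate_failure(exit_code: int, lines: Sequence[str]) -> tuple[str, Optional[str]]:
--     """Two-pass bottom-up scan: OOM lines win outright, then the other error patterns, then any non-empty line."""
--
--     cleaned: List[str] = [line.rstrip("\n") for line in lines]
--     non_empty = [line.strip() for line in cleaned if line and line.strip()]
--
--     def _other_error(lowered: str) -> bool:
--         return (
--             ("runtimeerror" in lowered and "cuda" in lowered)
--             or "childfailederror" in lowered
--             or ("error" in lowered and ("[error]" in lowered or lowered.startswith("error")))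
--         )
--
--     best: Optional[tuple[int, str]] = None
--     # Pass 1: bottom-most CUDA-OOM line beats everything.
--     for idx in range(len(cleaned) - 1, -1, -1):
--         cand = cleaned[idx].strip()
--         if cand and "cuda out of memory" in cand.lower():
--             best = (idx, cand)
--             break
--     # Pass 2: otherwise the bottom-most line matching any other error pattern.
--     if best is None:
--         for idx in range(len(cleaned) - 1, -1, -1):
--             cand = cleaned[idx].strip()
--             if cand and _other_error(cand.lower()):
--                 best = (idx, cand)
--                 break
--     # Pass 3: otherwise the bottom-most non-empty line.
--     if best is None:
--         for idx in range(len(cleaned) - 1, -1, -1):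
--             cand = cleaned[idx].strip()
--             if cand:
--                 best = (idx, cand)
--                 break
--
--     summary = f"Accelerate launch exited with status {exit_code}"
--     if best is not None and best[1]:
--         summary = f"{summary}: {best[1].strip()}"
--     summary = summary[:512]
--
--     excerpt: Optional[str] = None
--     if best is not None:
--         start = max(0, best[0] - 5)
--         end = min(len(cleaned), best[0] + 6)
--         snippet_lines = [line.strip() for line in cleaned[start:end] if line.strip()]
--         if snippet_lines:
--             excerpt = "\n".join(snippet_lines)
--     elif non_empty:
--         excerpt = "\n".join(non_empty[-10:])
--
--     if excerpt and len(excerpt) > 4000: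
--         excerpt = excerpt[-4000:]
--
--     return summary, excerpt
-- ===== Notes on version B (the rewrite author's own statement) =====
-- stated objective: simpler
-- what changed: A's single stateful bottom-up scan (OOM break, best-so-far state for the other patterns) is replaced by three independent stateless bottom-up searches tried in priority order: OOM first, then the other error patterns, then any non-empty line.
import Mathlib
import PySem

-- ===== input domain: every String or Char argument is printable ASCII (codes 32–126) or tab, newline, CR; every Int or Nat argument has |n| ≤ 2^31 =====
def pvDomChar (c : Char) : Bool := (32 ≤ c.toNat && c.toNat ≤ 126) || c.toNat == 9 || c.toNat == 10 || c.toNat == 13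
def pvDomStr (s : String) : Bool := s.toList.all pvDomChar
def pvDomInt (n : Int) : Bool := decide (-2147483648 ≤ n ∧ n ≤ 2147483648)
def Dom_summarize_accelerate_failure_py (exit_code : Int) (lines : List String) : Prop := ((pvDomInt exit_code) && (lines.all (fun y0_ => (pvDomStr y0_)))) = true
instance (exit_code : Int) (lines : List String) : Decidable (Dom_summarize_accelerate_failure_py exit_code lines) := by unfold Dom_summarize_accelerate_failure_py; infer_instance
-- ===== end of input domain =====

-- B replaces A's single stateful reverse scan (OOM breaks, other matches are kept only when
-- nothing was seen yet) by three independent bottom-up searches tried in priority order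
-- (objective: simpler decomposition; same cost).

-- hand-written port of line.rstrip("\n") (PySem has no char-set rstrip); exact: drops trailing '\n' only
def pvRstripNl (s : String) : String :=
  String.ofList ((s.toList.reverse.dropWhile (fun c => c == '\n')).reverse)

-- the tail shared verbatim by both Pythons (summary build / truncation, excerpt window, 4000-char trim)
def pvFinish (exit_code : Int) (cleaned : List String) (bi : Option Int) (bl : Option String) : String × Option String :=
  let non_empty := (cleaned.filter (fun l => !(l == "") && !(PySem.Str.strip l == ""))).map PySem.Str.strip
  let summary0 := "Accelerate launch exited with status ".toList ++ PySem.Int.toChars exit_code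
  let summary1 :=
    match bl with
    | some b => if ¬ (b = "") then summary0 ++ ": ".toList ++ (PySem.Str.strip b).toList else summary0
    | none => summary0
  let summary := String.ofList (PySem.Chars.slice summary1 none (some 512))
  let excerpt : Option String :=
    match bi with
    | some i =>
      let start := max 0 (i - 5)
      let stop := min (cleaned.length : Int) (i + 6)
      let snippet := ((PySem.List.slice cleaned (some start) (some stop)).filter
        (fun l => !(PySem.Str.strip l == ""))).map PySem.Str.strip
      if ¬ (snippet = []) then some (PySem.Str.join "\n" snippet) else none
    | none =>
      if ¬ (non_empty = []) then some (PySem.Str.join "\n" (PySem.List.slice non_empty (some (-10)) none)) else none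
  let excerpt2 :=
    match excerpt with
    | some e => if ¬ (e = "") ∧ (PySem.Str.len e : Int) > 4000 then some (String.ofList (PySem.Chars.slice e.toList (some (-4000)) none)) else some e
    | none => none
  (summary, excerpt2)

-- ===== PORT A =====
-- A's single reverse loop: best_index/best_line state; OOM sets-and-breaks; pvUpdate is one
-- Python 'if pattern: if best_line is None: set' block, applied three times in the ifs' order.
def pvUpdate (cond : Bool) (idx : Int) (cand : String) (st : Option Int × Option String) :
    Option Int × Option String :=
  if cond then (if st.2 = none then (some idx, some cand) else st) else st

def pvALoop (cleaned : List String) : List Int → Option Int × Option String → Option Int × Option String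
  | [], st => st
  | idx :: rest, (bi, bl) =>
    let candidate_raw := PySem.Str.strip (PySem.List.pyGetD cleaned idx "")
    if candidate_raw = "" then pvALoop cleaned rest (bi, bl)
    else
      let lowered := PySem.Str.lower candidate_raw
      if PySem.Str.isIn "cuda out of memory" lowered then (some idx, some candidate_raw)
      else
        let st1 := pvUpdate (PySem.Str.isIn "runtimeerror" lowered && PySem.Str.isIn "cuda" lowered) idx candidate_raw (bi, bl)
        let st2 := pvUpdate (PySem.Str.isIn "childfailederror" lowered) idx candidate_raw st1
        let st3 := pvUpdate (PySem.Str.isIn "error" lowered && (PySem.Str.isIn "[error]" lowered || PySem.Str.startswith lowered "error")) idx candidate_raw st2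
        pvALoop cleaned rest st3

-- A's fallback loop: bottom-most non-empty line, break on first hit
def pvAFallback (cleaned : List String) : List Int → Option Int × Option String
  | [] => (none, none)
  | idx :: rest =>
    let candidate := PySem.Str.strip (PySem.List.pyGetD cleaned idx "")
    if candidate = "" then pvAFallback cleaned rest else (some idx, some candidate)

def summarize_accelerate_failure_py (exit_code : Int) (lines : List String) : String × Option String :=
  let cleaned := lines.map pvRstripNl
  let idxs := PySem.List.pyRange ((cleaned.length : Int) - 1) (-1) (-1)
  let st := pvALoop cleaned idxs (none, none)
  let st2 := if st.2 = none then pvAFallback cleaned idxs else st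
  pvFinish exit_code cleaned st2.1 st2.2

-- ===== PORT B =====
def pvOtherError (lowered : String) : Bool :=
  (PySem.Str.isIn "runtimeerror" lowered && PySem.Str.isIn "cuda" lowered)
  || PySem.Str.isIn "childfailederror" lowered
  || (PySem.Str.isIn "error" lowered && (PySem.Str.isIn "[error]" lowered || PySem.Str.startswith lowered "error"))

-- one stateless bottom-up search: first index whose stripped line is non-empty and satisfies p
def pvBFind (cleaned : List String) (p : String → Bool) : List Int → Option (Int × String)
  | [] => none
  | idx :: rest =>
    let cand := PySem.Str.strip (PySem.List.pyGetD cleaned idx "")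
    -- 'if cand and p(cand.lower())' with Python's short-circuit 'and' as nested ifs
    if cand = "" then pvBFind cleaned p rest
    else if p (PySem.Str.lower cand) then some (idx, cand)
    else pvBFind cleaned p rest

def summarize_accelerate_failure_py_alt (exit_code : Int) (lines : List String) : String × Option String :=
  let cleaned := lines.map pvRstripNl
  let idxs := PySem.List.pyRange ((cleaned.length : Int) - 1) (-1) (-1)
  let best :=
    match pvBFind cleaned (fun low => PySem.Str.isIn "cuda out of memory" low) idxs with
    | some r => some r
    | none =>
      match pvBFind cleaned pvOtherError idxs with
      | some r => some r
      | none => pvBFind cleaned (fun _ => true) idxs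
  match best with
  | some r => pvFinish exit_code cleaned (some r.1) (some r.2)
  | none => pvFinish exit_code cleaned none none

-- ===== PRECONDITION & SPEC =====
def Spec_summarize_accelerate_failure_py (exit_code : Int) (lines : List String) (out : String × Option String) : Prop := out = summarize_accelerate_failure_py_alt exit_code lines
instance (exit_code : Int) (lines : List String) (out : String × Option String) : Decidable (Spec_summarize_accelerate_failure_py exit_code lines out) := by unfold Spec_summarize_accelerate_failure_py; infer_instance

-- ===== CLAIM (what is proved, stated in full; the proofs are below) =====
def Claim_equal_summarize_accelerate_failure_py : Prop := ∀ (exit_code : Int) (lines : List String), Dom_summarize_accelerate_failure_py exit_code lines → Spec_summarize_accelerate_failure_py exit_code lines (summarize_accelerate_failure_py exit_code lines)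

-- ===== LEMMAS AND PROOFS =====

-- a state whose best_line is already set is never changed by the non-OOM branches
theorem pvUpdate_snd_some (c : Bool) (idx : Int) (cand : String) (bi : Option Int) (b : String) :
    pvUpdate c idx cand (bi, some b) = (bi, some b) := by
  cases c <;> simp [pvUpdate]

-- the three sequential updates from the empty state fire iff some pattern matches
theorem pvUpdate_chain (c1 c2 c3 : Bool) (idx : Int) (cand : String) :
    pvUpdate c3 idx cand (pvUpdate c2 idx cand (pvUpdate c1 idx cand (none, none))) =
      if (c1 || c2 || c3) = true then (some idx, some cand) else (none, none) := by
  cases c1 <;> cases c2 <;> cases c3 <;> simp [pvUpdate]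

-- with best_line already set, A's loop can only be overridden by an OOM line (the break branch)
theorem pvALoop_some (cleaned : List String) (l : List Int) (bi : Option Int) (b : String) :
    pvALoop cleaned l (bi, some b) =
      match pvBFind cleaned (fun low => PySem.Str.isIn "cuda out of memory" low) l with
      | some r => (some r.1, some r.2)
      | none => (bi, some b) := by
  induction l generalizing bi b with
  | nil => simp [pvALoop, pvBFind]
  | cons idx rest ih =>
    simp only [pvALoop, pvBFind]
    by_cases h0 : PySem.Str.strip (PySem.List.pyGetD cleaned idx "") = ""
    · simp only [if_pos h0]; exact ih bi b
    · simp only [if_neg h0]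
      by_cases h1 : PySem.Str.isIn "cuda out of memory" (PySem.Str.lower (PySem.Str.strip (PySem.List.pyGetD cleaned idx ""))) = true
      · simp only [if_pos h1]
      · simp only [if_neg h1, pvUpdate_snd_some]
        exact ih bi b

-- from the empty state, A's loop is B's OOM search, then B's other-pattern search
theorem pvALoop_none (cleaned : List String) (l : List Int) :
    pvALoop cleaned l (none, none) =
      match pvBFind cleaned (fun low => PySem.Str.isIn "cuda out of memory" low) l with
      | some r => (some r.1, some r.2)
      | none =>
        match pvBFind cleaned pvOtherError l with
        | some r => (some r.1, some r.2)
        | none => (none, none) := by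
  induction l with
  | nil => simp [pvALoop, pvBFind]
  | cons idx rest ih =>
    simp only [pvALoop, pvBFind]
    by_cases h0 : PySem.Str.strip (PySem.List.pyGetD cleaned idx "") = ""
    · simp only [if_pos h0]; exact ih
    · simp only [if_neg h0]
      by_cases h1 : PySem.Str.isIn "cuda out of memory" (PySem.Str.lower (PySem.Str.strip (PySem.List.pyGetD cleaned idx ""))) = true
      · simp only [if_pos h1]
      · simp only [if_neg h1, pvUpdate_chain]
        by_cases h2 : pvOtherError (PySem.Str.lower (PySem.Str.strip (PySem.List.pyGetD cleaned idx ""))) = true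
        · have h2' := h2
          unfold pvOtherError at h2'
          simp only [if_pos h2', if_pos h2]
          refine (pvALoop_some cleaned rest _ _).trans ?_
          cases pvBFind cleaned (fun low => PySem.Str.isIn "cuda out of memory" low) rest <;> rfl
        · have h2' := h2
          unfold pvOtherError at h2'
          simp only [if_neg h2', if_neg h2]
          exact ih

-- A's fallback loop is B's trivial-predicate search
theorem pvAFallback_eq (cleaned : List String) (l : List Int) :
    pvAFallback cleaned l =
      match pvBFind cleaned (fun _ => true) l with
      | some r => (some r.1, some r.2)
      | none => (none, none) := by
  induction l with
  | nil => simp [pvAFallback, pvBFind]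
  | cons idx rest ih =>
    by_cases h0 : PySem.Str.strip (PySem.List.pyGetD cleaned idx "") = ""
    · simp [pvAFallback, pvBFind, h0, ih]
    · simp [pvAFallback, pvBFind, h0]

-- ===== VERDICT (by name: the statement is the Claim_ definition above) =====
theorem summarize_accelerate_failure_py_spec : Claim_equal_summarize_accelerate_failure_py := by
  intro exit_code lines _
  show _ = _
  unfold summarize_accelerate_failure_py summarize_accelerate_failure_py_alt
  dsimp only
  rw [pvALoop_none]
  cases hO : pvBFind (lines.map pvRstripNl) (fun low => PySem.Str.isIn "cuda out of memory" low)
      (PySem.List.pyRange (((lines.map pvRstripNl).length : Int) - 1) (-1) (-1)) with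
  | some r => simp
  | none =>
    cases hE : pvBFind (lines.map pvRstripNl) pvOtherError
        (PySem.List.pyRange (((lines.map pvRstripNl).length : Int) - 1) (-1) (-1)) with
    | some r => simp
    | none =>
      rw [pvAFallback_eq]
      cases hF : pvBFind (lines.map pvRstripNl) (fun _ => true)
          (PySem.List.pyRange (((lines.map pvRstripNl).length : Int) - 1) (-1) (-1)) with
      | some r => simp
      | none => simp
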